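/-
  THE RUNTIME RECORD OF THE TOY IMAGE: the base's entry points (the same in every program: ProgX/Base/Symbols.lean), the toy's one
  constructor `_sub_I_65535_1`, and the descriptor table of its three registered globals (Toy/Globals.lean).
  The contracts that cite it: `Asan.registerGlobalsSpec rt` (__asan_register_globals), `Asan.ctorSpec rt` (_sub_I_65535_1),
  `Asan.runCtorsSpec rt` (run_ctors). The first and the last are functions of the BASE whose statements cite the PROGRAM's table,
  so they are units of the program (until they are proved in the base for every table: CHANGES-to-shared-layers.md).
-/
import ProgX.Base.Spec.Runtime
import Toy.Labels
import Toy.Symbols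
import Toy.Globals
namespace Toy.Spec
open X86 X86.User Asan

/-- **The runtime of this image.** -/
def rt : Runtime := Toy.Globals.runtime Toy.symbols.rt

/-- The record is the base's, with the toy's constructor and table (so that a statement may cite either form). -/
theorem rt_eq : rt = ProgX.Base.Spec.runtime Toy.L._sub_I_65535_1.entry Toy.Globals.table Toy.Globals.descs := rfl

end Toy.Spec
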